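-- pv_equiv track=rewrite | github.com/vrthra/pymimid | sample/cgi.py | cgi_decode
-- ===== SOURCE A (Python) =====
-- hex_values = {
--     '0': 0,
--     '1': 1,
--     '2': 2,
--     '3': 3,
--     '4': 4,
--     '5': 5,
--     '6': 6,
--     '7': 7,
--     '8': 8,
--     '9': 9,
--     'a': 10,
--     'b': 11,
--     'c': 12,
--     'd': 13,
--     'e': 14,
--     'f': 15,
--     'A': 10,
--     'B': 11,
--     'C': 12,
--     'D': 13,
--     'E': 14,
--     'F': 15,
-- }
--
-- def cgi_decode(s):
--     t = ""
--     i = 0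
--     state = 0
--     val = iter(s)
--     while True:
--         if state == 1:
--             c = next(val, '')
--             if c == '' or c not in hex_values:
--                 raise Exception('0')
--             digit_high = c
--             i = i + 1
--             state = 2
--         elif state == 2:
--             c = next(val, '')
--             if c == '' or c not in hex_values:
--                 raise Exception('0')
--             digit_low = c
--             i = i + 1
--             state = 3
--         elif state == 3:
--             v = hex_values[digit_high] * 16 + hex_values[digit_low]
--             t = t + chr(v)
--             state = 0
--         elif state == 0:
--             c = next(val, '')
--             if c == '':
--                 return t
--             if c == '+':
--                 t = t + ' '
--             elif c == '%':
--                 state = 1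
--                 i = i + 1
--             else:
--                 t = t + c
--             i = i + 1
--     return t
-- ===== SOURCE B (Python) =====
-- hex_values = {
--     '0': 0, '1': 1, '2': 2, '3': 3, '4': 4, '5': 5, '6': 6, '7': 7,
--     '8': 8, '9': 9,
--     'a': 10, 'b': 11, 'c': 12, 'd': 13, 'e': 14, 'f': 15,
--     'A': 10, 'B': 11, 'C': 12, 'D': 13, 'E': 14, 'F': 15,
-- }
--
-- def cgi_decode(s):
--     out = []
--     j = 0
--     n = len(s)
--     while j < n:
--         c = s[j]
--         if c == '+':
--             out.append(' ')
--             j += 1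
--         elif c == '%':
--             if j + 2 >= n or s[j + 1] not in hex_values or s[j + 2] not in hex_values:
--                 raise Exception('0')
--             out.append(chr(hex_values[s[j + 1]] * 16 + hex_values[s[j + 2]]))
--             j += 3
--         else:
--             out.append(c)
--             j += 1
--     return ''.join(out)
-- ===== Notes on version B (the rewrite author's own statement) =====
-- stated objective: simpler
-- what changed: Replaces the iterator-driven four-state machine (with its dead i counter and cross-iteration state/digit variables) by a direct indexed scan that consumes 1 or 3 characters per step and joins a list of output chunks.
import Mathlib
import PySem

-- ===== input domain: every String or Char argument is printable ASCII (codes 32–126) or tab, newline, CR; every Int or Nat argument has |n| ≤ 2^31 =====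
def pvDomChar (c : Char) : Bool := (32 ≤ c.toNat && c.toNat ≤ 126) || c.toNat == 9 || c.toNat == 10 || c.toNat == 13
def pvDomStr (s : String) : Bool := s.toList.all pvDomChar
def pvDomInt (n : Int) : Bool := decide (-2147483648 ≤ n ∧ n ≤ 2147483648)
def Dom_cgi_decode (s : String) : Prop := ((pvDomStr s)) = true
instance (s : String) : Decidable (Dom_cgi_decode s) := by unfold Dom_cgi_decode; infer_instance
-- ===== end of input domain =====

-- B replaces A's iterator-driven four-state machine by a direct indexed scan consuming 1 or 3 chars per step (simpler); same values wherever A returns, Pre_ excludes exactly the inputs where A raises Exception('0').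


-- ===== PORT A =====
-- module-level dict hex_values (shared context of A and B)
def hex_values : PySem.Dict Char Int := PySem.Dict.ofList
  [('0', 0), ('1', 1), ('2', 2), ('3', 3), ('4', 4), ('5', 5), ('6', 6), ('7', 7),
   ('8', 8), ('9', 9),
   ('a', 10), ('b', 11), ('c', 12), ('d', 13), ('e', 14), ('f', 15),
   ('A', 10), ('B', 11), ('C', 12), ('D', 13), ('E', 14), ('F', 15)]

-- A's while-True state machine over the iterator `val`; on `raise Exception('0')` the port
-- returns t (those inputs are excluded by Pre_cgi_decode).
def cgiA (val : List Char) (t : List Char) (state : Nat) (dh dl : Char) : List Char :=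
  if state = 1 then
    match val with
    | [] => t                                   -- raise Exception('0')
    | c :: rest =>
      if (hex_values.get? c).isSome then cgiA rest t 2 c dl
      else t                                    -- raise Exception('0')
  else if state = 2 then
    match val with
    | [] => t                                   -- raise Exception('0')
    | c :: rest =>
      if (hex_values.get? c).isSome then cgiA rest t 3 dh c
      else t                                    -- raise Exception('0')
  else if state = 3 then
    cgiA val (t ++ [Char.ofNat ((hex_values.getD dh 0) * 16 + hex_values.getD dl 0).toNat]) 0 dh dl
  else
    match val with
    | [] => t                                   -- return t
    | c :: rest =>
      if c = '+' then cgiA rest (t ++ [' ']) 0 dh dl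
      else if c = '%' then cgiA rest t 1 dh dl
      else cgiA rest (t ++ [c]) 0 dh dl
termination_by 2 * val.length + (if state = 3 then 1 else 0)
decreasing_by all_goals first | (simp_all; omega) | simp_all

def cgi_decode (s : String) : String := String.ofList (cgiA s.toList [] 0 'a' 'a')

-- ===== PORT B =====
-- B's indexed left-to-right scan, consuming one char normally and three on '%'.
def cgiB (cs : List Char) : List Char :=
  match cs with
  | [] => []
  | c :: rest =>
    if c = '+' then ' ' :: cgiB rest
    else if c = '%' then
      match rest with
      | h :: l :: r =>
        if (hex_values.get? h).isSome && (hex_values.get? l).isSome then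
          Char.ofNat ((hex_values.getD h 0) * 16 + hex_values.getD l 0).toNat :: cgiB r
        else []                                 -- raise Exception('0')
      | _ => []                                 -- raise Exception('0')
    else c :: cgiB rest

def cgi_decode_alt (s : String) : String := String.ofList (cgiB s.toList)

-- ===== PRECONDITION & SPEC =====
def HexB (c : Char) : Bool := (hex_values.get? c).isSome

-- Pre_ excludes exactly the inputs on which A raises Exception('0'): some '%' not followed
-- by two hex digits.
def Pre_cgi_decode (s : String) : Prop :=
  ∀ i, i < s.toList.length → s.toList[i]! = '%' →
    i + 2 < s.toList.length ∧ HexB s.toList[i + 1]! = true ∧ HexB s.toList[i + 2]! = true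
instance (s : String) : Decidable (Pre_cgi_decode s) := by unfold Pre_cgi_decode; infer_instance

def pvWitness_cgi_decode : String := "a+b%41%3dC"

def Spec_cgi_decode (s : String) (out : String) : Prop := out = cgi_decode_alt s
instance (s : String) (out : String) : Decidable (Spec_cgi_decode s out) := by unfold Spec_cgi_decode; infer_instance

-- ===== CLAIM (what is proved, stated in full; the proofs are below) =====
def Claim_equal_cgi_decode : Prop := ∀ (s : String), Dom_cgi_decode s → Pre_cgi_decode s → Spec_cgi_decode s (cgi_decode s)

-- ===== LEMMAS AND PROOFS =====
def PreL (cs : List Char) : Prop :=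
  ∀ i, i < cs.length → cs[i]! = '%' →
    i + 2 < cs.length ∧ HexB cs[i + 1]! = true ∧ HexB cs[i + 2]! = true

lemma preL_tail {c : Char} {cs : List Char} (hp : PreL (c :: cs)) : PreL cs := by
  intro i hi hpi
  have h := hp (i + 1) (by simpa using Nat.succ_lt_succ hi)
    (by simpa [List.getElem!_cons_succ] using hpi)
  refine ⟨?_, ?_, ?_⟩
  · have h1 := h.1; simp [List.length_cons] at h1; omega
  · simpa [List.getElem!_cons_succ] using h.2.1
  · simpa [List.getElem!_cons_succ] using h.2.2

lemma preL_pct {rest : List Char} (hp : PreL ('%' :: rest)) :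
    ∃ h l r, rest = h :: l :: r ∧ HexB h = true ∧ HexB l = true ∧ PreL r := by
  have h0 := hp 0 (by simp) (by simp)
  match rest, h0 with
  | h :: l :: r, h0 =>
    refine ⟨h, l, r, rfl, ?_, ?_, preL_tail (preL_tail (preL_tail hp))⟩
    · simpa [List.getElem!_cons_succ] using h0.2.1
    · simpa [List.getElem!_cons_succ] using h0.2.2
  | [], h0 => exact absurd h0.1 (by simp)
  | [h], h0 => exact absurd h0.1 (by simp)

-- one-step unfolding lemmas for the two loops
lemma cgiA_nil (t : List Char) (dh dl : Char) : cgiA [] t 0 dh dl = t := by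
  rw [cgiA.eq_def]; rfl

lemma cgiA_plus (rest t : List Char) (dh dl : Char) :
    cgiA ('+' :: rest) t 0 dh dl = cgiA rest (t ++ [' ']) 0 dh dl := by
  rw [cgiA.eq_def]; rfl

lemma cgiA_other {c : Char} (h1 : c ≠ '+') (h2 : c ≠ '%') (rest t : List Char) (dh dl : Char) :
    cgiA (c :: rest) t 0 dh dl = cgiA rest (t ++ [c]) 0 dh dl := by
  rw [cgiA.eq_def]
  show (if c = '+' then cgiA rest (t ++ [' ']) 0 dh dl
        else if c = '%' then cgiA rest t 1 dh dl
        else cgiA rest (t ++ [c]) 0 dh dl) = _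
  rw [if_neg h1, if_neg h2]

lemma cgiA_pct {h l : Char} (hh : (hex_values.get? h).isSome = true)
    (hl : (hex_values.get? l).isSome = true) (r t : List Char) (dh dl : Char) :
    cgiA ('%' :: h :: l :: r) t 0 dh dl =
      cgiA r (t ++ [Char.ofNat ((hex_values.getD h 0) * 16 + hex_values.getD l 0).toNat]) 0 h l := by
  rw [cgiA.eq_def]
  show cgiA (h :: l :: r) t 1 dh dl = _
  rw [cgiA.eq_def]
  show (if (hex_values.get? h).isSome = true then cgiA (l :: r) t 2 h dl else t) = _
  rw [if_pos hh, cgiA.eq_def]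
  show (if (hex_values.get? l).isSome = true then cgiA r t 3 h l else t) = _
  rw [if_pos hl, cgiA.eq_def]
  rfl

lemma cgiB_nil : cgiB [] = [] := rfl

lemma cgiB_plus (rest : List Char) : cgiB ('+' :: rest) = ' ' :: cgiB rest := by
  rw [cgiB.eq_def]
  rfl

lemma cgiB_other {c : Char} (h1 : c ≠ '+') (h2 : c ≠ '%') (rest : List Char) :
    cgiB (c :: rest) = c :: cgiB rest := by
  rw [cgiB.eq_def]
  change (if c = '+' then _ else if c = '%' then _ else c :: cgiB rest) = _
  rw [if_neg h1, if_neg h2]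

lemma cgiB_pct {h l : Char} (hh : (hex_values.get? h).isSome = true)
    (hl : (hex_values.get? l).isSome = true) (r : List Char) :
    cgiB ('%' :: h :: l :: r) =
      Char.ofNat ((hex_values.getD h 0) * 16 + hex_values.getD l 0).toNat :: cgiB r := by
  rw [cgiB.eq_def]
  show (if (hex_values.get? h).isSome && (hex_values.get? l).isSome then
          Char.ofNat ((hex_values.getD h 0) * 16 + hex_values.getD l 0).toNat :: cgiB r
        else []) = _
  rw [if_pos (by simp [hh, hl])]

lemma cgiA_eq_cgiB (cs : List Char) (t : List Char) (dh dl : Char) (hp : PreL cs) :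
    cgiA cs t 0 dh dl = t ++ cgiB cs := by
  match cs with
  | [] => rw [cgiA_nil, cgiB_nil, List.append_nil]
  | c :: rest =>
    by_cases hplus : c = '+'
    · subst hplus
      rw [cgiA_plus, cgiB_plus, cgiA_eq_cgiB rest (t ++ [' ']) dh dl (preL_tail hp)]
      simp
    · by_cases hpct : c = '%'
      · subst hpct
        obtain ⟨h, l, r, hrest, hh, hl, hr⟩ := preL_pct hp
        subst hrest
        have hh' : (hex_values.get? h).isSome = true := by simpa [HexB] using hh
        have hl' : (hex_values.get? l).isSome = true := by simpa [HexB] using hl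
        rw [cgiA_pct hh' hl', cgiB_pct hh' hl', cgiA_eq_cgiB r _ h l hr]
        simp
      · rw [cgiA_other hplus hpct, cgiB_other hplus hpct,
          cgiA_eq_cgiB rest (t ++ [c]) dh dl (preL_tail hp)]
        simp
termination_by cs.length
decreasing_by all_goals first | (simp; omega) | (simp_all; omega) | simp_all

-- ===== VERDICT (by name: the statement is the Claim_ definition above) =====
theorem cgi_decode_spec : Claim_equal_cgi_decode := by
  intro s _ hpre
  unfold Spec_cgi_decode cgi_decode cgi_decode_alt
  rw [cgiA_eq_cgiB s.toList [] 'a' 'a' hpre]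
  simp
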